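-- pv_equiv track=rewrite | github.com/Midhilesh4890/Leetcode-Problems | Google/XY_pattern.py | find_variables
-- ===== SOURCE A (Python) =====
-- from typing import Dict, List, Deque
-- from typing import Dict, List, Optional
--
-- def find_variables(input_string: str) -> List[str]:
--     variables = []
--     index = 0
--
--     # Scan through the string looking for pairs of '#' characters
--     while (start := input_string.find("#", index)) != -1:
--         end = input_string.find("#", start + 1)
--         if end != -1:
--             variables.append(input_string[start:end + 1])
--             index = end + 1
--         else:
--             break
--
--     return variables
-- ===== SOURCE B (Python) =====
-- def find_variables(input_string):
--     variables = []
--     current = None  # chunk being built since an opening '#', else None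
--     for ch in input_string:
--         if current is None:
--             if ch == '#':
--                 current = '#'
--         else:
--             current += ch
--             if ch == '#':
--                 variables.append(current)
--                 current = None
--     return variables
-- ===== Notes on version B (the rewrite author's own statement) =====
-- stated objective: alternative
-- what changed: Replaces the repeated str.find/advance-index loop with a single character-by-character state-machine pass that accumulates the current hash-delimited chunk.
import Mathlib
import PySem

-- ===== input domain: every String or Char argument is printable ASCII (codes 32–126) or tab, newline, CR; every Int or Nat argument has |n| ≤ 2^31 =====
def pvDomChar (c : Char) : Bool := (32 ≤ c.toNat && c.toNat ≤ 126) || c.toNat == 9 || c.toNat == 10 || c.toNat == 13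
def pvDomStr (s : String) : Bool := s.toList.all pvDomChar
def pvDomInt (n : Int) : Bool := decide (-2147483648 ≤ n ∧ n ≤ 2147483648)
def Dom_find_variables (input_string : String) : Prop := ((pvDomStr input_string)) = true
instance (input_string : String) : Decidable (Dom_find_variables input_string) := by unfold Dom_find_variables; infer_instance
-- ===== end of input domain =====

-- B replaces A's repeated str.find/advance-index loop by a single character-by-character
-- state-machine pass accumulating the current hash-delimited chunk (objective: alternative).

-- ===== PORT A =====
-- literal transliteration of A's while-loop: find the next hash from index, find the closing one,
-- append the slice, continue after it. The fuel argument only makes the loop total: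
-- input_string.toList.length + 1 never runs out (each iteration advances index).
def findVarsLoop (s : List Char) : Nat → Nat → List String
  | 0, _ => []
  | fuel + 1, index =>
    let start := PySem.Chars.findFrom s ['#'] (index : Int) none
    if start = -1 then []
    else
      let e := PySem.Chars.findFrom s ['#'] (start + 1) none
      if e = -1 then []
      else String.ofList (PySem.List.slice s (some start) (some (e + 1))) ::
        findVarsLoop s fuel (e.toNat + 1)

def find_variables (input_string : String) : List String :=
  findVarsLoop input_string.toList (input_string.toList.length + 1) 0

-- ===== PORT B =====
-- one fold step of Source B's for-loop: state = (variables, current)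
def fvStep (st : List String × Option (List Char)) (ch : Char) : List String × Option (List Char) :=
  match st with
  | (vars, none) => if ch = '#' then (vars, some ['#']) else (vars, none)
  | (vars, some cur) =>
    let cur2 := cur ++ [ch]
    if ch = '#' then (vars ++ [String.ofList cur2], none) else (vars, some cur2)

def find_variables_alt (input_string : String) : List String :=
  (input_string.toList.foldl fvStep ([], none)).1

-- ===== PRECONDITION & SPEC =====
def Spec_find_variables (input_string : String) (out : List String) : Prop := out = find_variables_alt input_string
instance (input_string : String) (out : List String) : Decidable (Spec_find_variables input_string out) := by unfold Spec_find_variables; infer_instance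

-- ===== CLAIM (what is proved, stated in full; the proofs are below) =====
def Claim_equal_find_variables : Prop := ∀ (input_string : String), Dom_find_variables input_string → Spec_find_variables input_string (find_variables input_string)

-- ===== LEMMAS AND PROOFS =====

-- facts about PySem.Chars.find/findFrom used by the proofs:
theorem pvFindGoSingle (c : Char) (cs : List Char) (k : Nat) :
    PySem.Chars.find.go [c] cs k =
      if c ∈ cs then ((k + (cs.takeWhile (· != c)).length : Nat) : Int) else -1 := by
  induction cs generalizing k with
  | nil => simp [PySem.Chars.find.go]
  | cons hd t ih =>
    by_cases hc : hd = c
    · subst hc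
      simp [PySem.Chars.find.go, List.isPrefixOf]
    · have hb : (hd != c) = true := by simp [hc]
      have hpre : ([c].isPrefixOf (hd :: t)) = false := by
        simp [List.isPrefixOf]; exact fun hh => (hc hh.symm).elim
      have hne : ¬ (c = hd) := fun hh => hc hh.symm
      simp only [PySem.Chars.find.go, hpre, Bool.false_eq_true, if_false]
      rw [ih (k + 1)]
      simp only [List.takeWhile, hb, List.length_cons, List.mem_cons]
      by_cases hm : c ∈ t
      · rw [if_pos hm, if_pos (show c = hd ∨ c ∈ t from Or.inr hm)]
        push_cast; omega
      · rw [if_neg hm, if_neg (show ¬(c = hd ∨ c ∈ t) by tauto)]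

theorem pvFindSingle (cs : List Char) (c : Char) :
    PySem.Chars.find cs [c] =
      if c ∈ cs then (((cs.takeWhile (· != c)).length : Nat) : Int) else -1 := by
  simpa using pvFindGoSingle c cs 0

theorem pvFindFromNat (s : List Char) (c : Char) (k : Nat) (hk : k ≤ s.length) :
    PySem.Chars.findFrom s [c] (k : Int) none =
      if c ∈ s.drop k then ((k + ((s.drop k).takeWhile (· != c)).length : Nat) : Int) else -1 := by
  rw [PySem.Chars.findFrom_natCast s [c] k hk, pvFindSingle]
  by_cases hm : c ∈ s.drop k
  · rw [if_pos hm, if_pos hm,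
      if_neg (show ¬((((s.drop k).takeWhile (· != c)).length : Nat) : Int) = -1 by omega)]
    push_cast; ring
  · simp [hm]

theorem pvFindFromBig (s sub : List Char) (k : Nat) (hk : s.length < k) :
    PySem.Chars.findFrom s sub (k : Int) none = -1 := by
  have h1 : ¬ ((k : Int) < 0) := by omega
  have h2 : ((s.length : Int) < (k : Int)) := by exact_mod_cast hk
  simp [PySem.Chars.findFrom, h1, h2]

theorem pvTwLt (c : Char) (l : List Char) (h : c ∈ l) :
    (l.takeWhile (· != c)).length < l.length := by
  induction l with
  | nil => simp at h
  | cons x t ih =>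
    by_cases hx : x = c
    · subst hx; simp [List.takeWhile]
    · have hct : c ∈ t := by
        rcases List.mem_cons.1 h with h1 | h1
        · exact absurd h1.symm hx
        · exact h1
      have hb : (x != c) = true := by simp [hx]
      have := ih hct
      simp only [List.takeWhile, hb, List.length_cons]
      omega

-- canonical pair decomposition both ports compute
def pairs (l : List Char) : List (List Char) :=
  if h1 : '#' ∈ l then
    if h2 : '#' ∈ (l.dropWhile (· != '#')).tail then
      ('#' :: ((l.dropWhile (· != '#')).tail.takeWhile (· != '#') ++ ['#']))
        :: pairs (((l.dropWhile (· != '#')).tail.dropWhile (· != '#')).tail)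
    else []
  else []
termination_by l.length
decreasing_by
  have hpos : 0 < l.length := List.length_pos_of_mem h1
  have a1 : (l.dropWhile (· != '#')).length ≤ l.length := (List.dropWhile_sublist _).length_le
  have a2 : (((l.dropWhile (· != '#')).tail.dropWhile (· != '#'))).length
      ≤ (l.dropWhile (· != '#')).tail.length := (List.dropWhile_sublist _).length_le
  simp only [List.length_tail] at *
  omega

theorem pvDropTakeWhile (l : List Char) (p : Char → Bool) :
    l.drop (l.takeWhile p).length = l.dropWhile p := by
  induction l with
  | nil => rfl
  | cons c t ih => by_cases h : p c <;> simp [List.takeWhile, List.dropWhile, h, ih]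

theorem pvDropWhileMem (c : Char) (l : List Char) (h : c ∈ l) :
    l.dropWhile (· != c) = c :: (l.dropWhile (· != c)).tail := by
  induction l with
  | nil => simp at h
  | cons x t ih =>
    by_cases hx : x = c
    · subst hx; simp [List.dropWhile]
    · have hct : c ∈ t := by
        rcases List.mem_cons.1 h with h1 | h1
        · exact absurd h1.symm hx
        · exact h1
      have hb : (x != c) = true := by simp [hx]
      simp only [List.dropWhile, hb]
      exact ih hct

theorem pvTailDropWhile (c : Char) (l : List Char) :
    (l.dropWhile (· != c)).tail = l.drop ((l.takeWhile (· != c)).length + 1) := by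
  rw [← pvDropTakeWhile l (· != c)]
  rw [List.tail_drop]

-- ===== A-side: findVarsLoop computes pairs of the remaining suffix =====
theorem aLoop_eq (s : List Char) :
    ∀ (fuel k : Nat), s.length + 1 ≤ fuel + k →
      findVarsLoop s fuel k = (pairs (s.drop k)).map String.ofList
  | 0, k, h => by
    rw [findVarsLoop, List.drop_eq_nil_of_le (by omega), pairs]; simp
  | fuel + 1, k, h => by
    simp only [findVarsLoop]
    by_cases hk : k ≤ s.length
    · by_cases h1 : '#' ∈ s.drop k
      · set t1 := ((s.drop k).takeWhile (· != '#')).length with ht1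
        have hst : PySem.Chars.findFrom s ['#'] (k : Int) none = ((k + t1 : Nat) : Int) := by
          rw [pvFindFromNat s '#' k hk, if_pos h1, ht1]
        have htlt : t1 < (s.drop k).length := ht1 ▸ pvTwLt '#' _ h1
        rw [List.length_drop] at htlt
        have hcast : PySem.Chars.findFrom s ['#'] (k : Int) none + 1 = ((k + t1 + 1 : Nat) : Int) := by
          rw [hst]; omega
        have hk2 : k + t1 + 1 ≤ s.length := by omega
        have hdrop : s.drop (k + t1 + 1) = ((s.drop k).dropWhile (· != '#')).tail := by
          rw [pvTailDropWhile '#' (s.drop k), List.drop_drop, ht1]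
          congr 1
          try omega
        rw [if_neg (by rw [hst]; omega)]
        by_cases h2 : '#' ∈ s.drop (k + t1 + 1)
        · have hend : PySem.Chars.findFrom s ['#']
              (PySem.Chars.findFrom s ['#'] (k : Int) none + 1) none
              = ((k + t1 + 1 + (((s.drop k).dropWhile (· != '#')).tail.takeWhile (· != '#')).length : Nat) : Int) := by
            rw [hcast, pvFindFromNat s '#' _ hk2, if_pos h2, hdrop]
          set r1 := ((s.drop k).dropWhile (· != '#')).tail with hr1
          set t2 := (r1.takeWhile (· != '#')).length with ht2
          have hmem2 : '#' ∈ r1 := by rw [← hdrop]; exact h2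
          have hd1 : s.drop (k + t1) = '#' :: r1 := by
            have hh : s.drop (k + t1) = (s.drop k).drop t1 := by rw [List.drop_drop]
            rw [hh, ht1, pvDropTakeWhile]
            exact pvDropWhileMem '#' _ h1
          have hsplit : r1 = r1.takeWhile (· != '#') ++ ('#' :: (r1.dropWhile (· != '#')).tail) := by
            conv_lhs => rw [← List.takeWhile_append_dropWhile (p := (· != '#')) (l := r1)]
            rw [← pvDropWhileMem '#' r1 hmem2]
          have hslice : PySem.List.slice s (some (PySem.Chars.findFrom s ['#'] (k : Int) none))
              (some (PySem.Chars.findFrom s ['#'] (PySem.Chars.findFrom s ['#'] (k : Int) none + 1) none + 1))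
              = '#' :: (r1.takeWhile (· != '#') ++ ['#']) := by
            rw [hend, hst,
              show ((k + t1 + 1 + t2 : Nat) : Int) + 1 = ((k + t1 + 1 + t2 + 1 : Nat) : Int) by omega]
            rw [PySem.List.slice_natCast, show (k + t1 + 1 + t2 + 1) - (k + t1) = t2 + 2 by omega]
            rw [hd1]
            simp only [List.take_succ_cons]
            congr 1
            conv_lhs => rw [hsplit]
            rw [show t2 + 1 = (r1.takeWhile (· != '#')).length + 1 from by rw [ht2]]
            rw [List.take_append]
            simp
          have htail : (PySem.Chars.findFrom s ['#']
              (PySem.Chars.findFrom s ['#'] (k : Int) none + 1) none).toNat + 1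
              = k + t1 + 1 + t2 + 1 := by
            rw [hend]; omega
          have hdrop2 : s.drop (k + t1 + 1 + t2 + 1) = (r1.dropWhile (· != '#')).tail := by
            have hh : s.drop (k + t1 + 1 + t2 + 1) = (s.drop (k + t1 + 1)).drop (t2 + 1) := by
              rw [List.drop_drop]
              congr 1
              try omega
            rw [hh, hdrop, pvTailDropWhile '#' r1, ht2]
          have ih2 : findVarsLoop s fuel (k + t1 + 1 + t2 + 1)
              = (pairs (s.drop (k + t1 + 1 + t2 + 1))).map String.ofList :=
            aLoop_eq s fuel (k + t1 + 1 + t2 + 1) (by omega)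
          rw [if_neg (by rw [hend]; omega), hslice, htail, ih2, hdrop2]
          conv_rhs => rw [pairs]
          rw [dif_pos h1,
            dif_pos (show '#' ∈ ((s.drop k).dropWhile (· != '#')).tail by rw [← hr1]; exact hmem2)]
          rw [← hr1]
          simp
        · have hmem2 : '#' ∉ ((s.drop k).dropWhile (· != '#')).tail := by rw [← hdrop]; exact h2
          rw [if_pos (by rw [hcast, pvFindFromNat s '#' _ hk2, if_neg h2])]
          rw [pairs, dif_pos h1, dif_neg hmem2]; simp
      · rw [if_pos (by rw [pvFindFromNat s '#' k hk, if_neg h1])]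
        rw [pairs, dif_neg h1]; simp
    · rw [if_pos (pvFindFromBig s ['#'] k (by omega))]
      rw [List.drop_eq_nil_of_le (by omega), pairs]; simp

-- ===== B-side: the fold computes pairs =====
def pairsFrom : Option (List Char) → List Char → List (List Char)
  | none, l => pairs l
  | some cur, l =>
    if '#' ∈ l then
      (cur ++ l.takeWhile (· != '#') ++ ['#']) :: pairs ((l.dropWhile (· != '#')).tail)
    else []

theorem pairs_cons_ne (c : Char) (l : List Char) (hc : c ≠ '#') :
    pairs (c :: l) = pairs l := by
  have hb : (c != '#') = true := by simp [hc]
  have hcc : ¬ ('#' = c) := fun h => hc h.symm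
  conv_lhs => rw [pairs]
  conv_rhs => rw [pairs]
  simp [List.dropWhile, hb, hcc]

theorem pairs_cons_hash (l : List Char) :
    pairs ('#' :: l) = pairsFrom (some ['#']) l := by
  rw [pairs, pairsFrom]
  simp [List.dropWhile, List.takeWhile]

theorem bFold_eq (l : List Char) (acc : List String) (st : Option (List Char)) :
    (l.foldl fvStep (acc, st)).1 = acc ++ (pairsFrom st l).map String.ofList := by
  induction l generalizing acc st with
  | nil =>
    cases st with
    | none => simp [pairsFrom, pairs]
    | some cur => simp [pairsFrom]
  | cons c t ih =>
    cases st with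
    | none =>
      by_cases hc : c = '#'
      · subst hc
        have hstep : fvStep (acc, none) '#' = (acc, some ['#']) := by simp [fvStep]
        rw [List.foldl_cons, hstep, ih,
          show pairsFrom none ('#' :: t) = pairsFrom (some ['#']) t from pairs_cons_hash t]
      · have hstep : fvStep (acc, none) c = (acc, none) := by simp [fvStep, hc]
        rw [List.foldl_cons, hstep, ih,
          show pairsFrom none (c :: t) = pairsFrom none t from pairs_cons_ne c t hc]
    | some cur =>
      by_cases hc : c = '#'
      · subst hc
        have hstep : fvStep (acc, some cur) '#' = (acc ++ [String.ofList (cur ++ ['#'])], none) := by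
          simp [fvStep]
        have hp : pairsFrom (some cur) ('#' :: t) = (cur ++ ['#']) :: pairs t := by
          simp [pairsFrom, List.dropWhile, List.takeWhile]
        rw [List.foldl_cons, hstep, ih, hp]
        simp [pairsFrom]
      · have hb : (c != '#') = true := by simp [hc]
        have hcc : ¬ ('#' = c) := fun h => hc h.symm
        have hstep : fvStep (acc, some cur) c = (acc, some (cur ++ [c])) := by
          simp [fvStep, hc]
        rw [List.foldl_cons, hstep, ih]
        simp [pairsFrom, List.dropWhile, List.takeWhile, hb, hcc]

-- ===== VERDICT (by name: the statement is the Claim_ definition above) =====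
theorem find_variables_spec : Claim_equal_find_variables := by
  intro s _
  unfold Spec_find_variables find_variables find_variables_alt
  rw [aLoop_eq s.toList (s.toList.length + 1) 0 (by omega), bFold_eq]
  simp [pairsFrom]
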